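-- pv_equiv track=rewrite | github.com/kimjune01/june.kim | worklog/h11_heuristic_spanner_v2.py | failing_pairs_by_type
-- ===== SOURCE A (Python) =====
-- from collections import defaultdict
-- import heapq
--
-- def build_adj(k, edges):
--     adj = defaultdict(list)
--     for (a, b, t) in edges:
--         adj[a].append((b, t))
--         adj[b].append((a, t))
--     return adj
--
-- def temporal_reachable_from(source, adj):
--     best = {source: 0}
--     queue = [(0, source)]
--     heapq.heapify(queue)
--     while queue:
--         t_arr, u = heapq.heappop(queue)
--         if t_arr > best.get(u, float('inf')):
--             continue
--         for (v, t_edge) in adj[u]: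
--             if t_edge >= t_arr:
--                 if t_edge < best.get(v, float('inf')):
--                     best[v] = t_edge
--                     heapq.heappush(queue, (t_edge, v))
--     return set(best.keys())
--
-- def failing_pairs_by_type(k, edges, orig_reach):
--     adj = build_adj(k, edges)
--     n = 2 * k
--     fails = {'AA': 0, 'AB': 0, 'BA': 0, 'BB': 0}
--     for s in range(n):
--         r = temporal_reachable_from(s, adj)
--         for d in range(n):
--             if s != d and orig_reach.get((s, d), False) and d not in r:
--                 s_type = 'A' if s < k else 'B'
--                 d_type = 'A' if d < k else 'B'
--                 fails[s_type + d_type] += 1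
--     return fails
-- ===== SOURCE B (Python) =====
-- from collections import defaultdict, deque
--
-- def build_adj(k, edges):
--     adj = defaultdict(list)
--     for (a, b, t) in edges:
--         adj[a].append((b, t))
--         adj[b].append((a, t))
--     return adj
--
-- def temporal_reachable_relax(source, adj):
--     # label-correcting relaxation: no priority queue; re-enqueue on every strict improvement
--     best = {source: 0}
--     dq = deque([source])
--     while dq:
--         u = dq.popleft()
--         for (v, t_edge) in adj[u]:
--             if t_edge >= best[u] and t_edge < best.get(v, float('inf')):
--                 best[v] = t_edge
--                 dq.append(v)
--     return set(best.keys())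
--
-- def failing_pairs_by_type(k, edges, orig_reach):
--     adj = build_adj(k, edges)
--     n = 2 * k
--     failed = [('A' if s < k else 'B') + ('A' if d < k else 'B')
--               for s in range(n)
--               for r in (temporal_reachable_relax(s, adj),)
--               for d in range(n)
--               if s != d and orig_reach.get((s, d), False) and d not in r]
--     return {key: failed.count(key) for key in ('AA', 'AB', 'BA', 'BB')}
-- ===== Notes on version B (the rewrite author's own statement) =====
-- stated objective: alternative
-- what changed: The heap Dijkstra with stale-entry skipping becomes a deque-based label-correcting relaxation (no priority queue), and the counting is restructured: instead of a mutable counter dict incremented inside the nested loops, B builds a flat list of bucket labels with one comprehension and then counts each of the four labels, assembling the result dict at the end.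
import Mathlib
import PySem

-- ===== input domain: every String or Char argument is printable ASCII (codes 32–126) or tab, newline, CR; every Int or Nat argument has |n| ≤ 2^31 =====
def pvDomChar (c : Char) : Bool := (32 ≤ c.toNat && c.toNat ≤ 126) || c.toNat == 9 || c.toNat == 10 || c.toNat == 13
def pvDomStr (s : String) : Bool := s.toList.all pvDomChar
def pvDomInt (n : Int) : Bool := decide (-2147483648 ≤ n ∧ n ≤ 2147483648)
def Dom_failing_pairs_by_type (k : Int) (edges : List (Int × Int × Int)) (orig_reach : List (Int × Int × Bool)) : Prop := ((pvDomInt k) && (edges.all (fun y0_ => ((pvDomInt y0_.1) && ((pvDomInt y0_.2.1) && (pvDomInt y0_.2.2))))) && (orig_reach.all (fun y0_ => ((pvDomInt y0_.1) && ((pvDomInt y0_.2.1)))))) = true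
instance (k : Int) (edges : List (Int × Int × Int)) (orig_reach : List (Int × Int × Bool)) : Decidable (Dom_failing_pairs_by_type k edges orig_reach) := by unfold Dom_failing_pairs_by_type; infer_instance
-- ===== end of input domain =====

-- B replaces A's binary-heap Dijkstra by a deque-based label-correcting relaxation and
-- restructures the counting: it builds a flat list of bucket labels by a comprehension and
-- counts each of the four labels at the end, instead of incrementing a counter dict in the
-- nested loops.  Objective: alternative algorithm, same result.

-- ===== PORT A =====
-- build_adj (shared verbatim by both Pythons; k is unused, as in the Python)
def build_adj (_k : Int) (edges : List (Int × Int × Int)) : PySem.Dict Int (List (Int × Int)) :=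
  edges.foldl (fun adj e =>
    (adj.modify e.1 [] (fun l => l ++ [(e.2.1, e.2.2)])).modify e.2.1 [] (fun l => l ++ [(e.1, e.2.2)]))
    PySem.Dict.empty

-- heapq's queue modeled as a plain list: heappush appends; heappop removes the first
-- lexicographically-smallest pair — value-exact for heapq, whose heappop returns the minimum
-- element of the (totally ordered) Int-pair collection it holds.
def pvHeapLe (a b : Int × Int) : Bool := decide (a.1 < b.1) || (a.1 == b.1 && decide (a.2 ≤ b.2))

def pvHeapPop : List (Int × Int) → ((Int × Int) × List (Int × Int))
  | [] => ((0, 0), [])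
  | [x] => (x, [])
  | x :: y :: rest =>
    let p := pvHeapPop (y :: rest)
    if pvHeapLe x p.1 then (x, y :: rest) else (p.1, x :: p.2)

-- one step of A's inner 'for (v, t_edge) in adj[u]' relaxation loop
def pvRelaxA (t_arr : Int) (st : PySem.Dict Int Int × List (Int × Int)) (e : Int × Int) :
    PySem.Dict Int Int × List (Int × Int) :=
  if decide (t_arr ≤ e.2) then
    if (st.1.get? e.1).all (fun bv => decide (e.2 < bv)) then
      (st.1.insert e.1 e.2, st.2 ++ [(e.2, e.1)])
    else st
  else st

-- A's 'while queue' loop.  The fuel only makes the recursion structural; it is proved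
-- (pvFuel) to exceed the loop's decreasing measure, so it never runs out.
def pvHeapLoop (adj : PySem.Dict Int (List (Int × Int))) :
    Nat → PySem.Dict Int Int → List (Int × Int) → PySem.Dict Int Int
  | 0, best, _ => best
  | _ + 1, best, [] => best
  | fuel + 1, best, q :: qs =>
    let p := pvHeapPop (q :: qs)
    if (best.get? p.1.2).any (fun b => decide (b < p.1.1)) then pvHeapLoop adj fuel best p.2
    else
      let st := (adj.getD p.1.2 []).foldl (pvRelaxA p.1.1) (best, p.2)
      pvHeapLoop adj fuel st.1 st.2

def pvFuel (adj : PySem.Dict Int (List (Int × Int))) : Nat :=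
  2 * (adj.items.map (fun p => p.2.length)).sum + 2

def temporal_reachable_from (source : Int) (adj : PySem.Dict Int (List (Int × Int))) : PySem.Set Int :=
  PySem.Set.ofList
    (pvHeapLoop adj (pvFuel adj) ((PySem.Dict.empty).insert source 0) [(0, source)]).keys

def failing_pairs_by_type (k : Int) (edges : List (Int × Int × Int)) (orig_reach : List (Int × Int × Bool)) : List (String × Int) :=
  let adj := build_adj k edges
  let n := 2 * k
  let orig : PySem.Dict (Int × Int) Bool :=
    PySem.Dict.ofList (orig_reach.map (fun e => ((e.1, e.2.1), e.2.2)))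
  let fails0 : PySem.Dict String Int :=
    ((((PySem.Dict.empty).insert "AA" 0).insert "AB" 0).insert "BA" 0).insert "BB" 0
  let fails := (PySem.List.pyRange 0 n 1).foldl (fun fails s =>
    let r := temporal_reachable_from s adj
    (PySem.List.pyRange 0 n 1).foldl (fun fails d =>
      if (!(s == d)) && orig.getD (s, d) false && !(PySem.Set.contains r d) then
        let s_type := if s < k then "A" else "B"
        let d_type := if d < k then "A" else "B"
        fails.modify (s_type ++ d_type) 0 (fun c => c + 1)
      else fails) fails) fails0
  fails.items

-- ===== PORT B =====
-- one step of B's inner relaxation loop; best[u] always exists when u is popped (getD reads it)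
def pvRelaxB (u : Int) (st : PySem.Dict Int Int × List Int) (e : Int × Int) :
    PySem.Dict Int Int × List Int :=
  if decide (st.1.getD u 0 ≤ e.2) && (st.1.get? e.1).all (fun bv => decide (e.2 < bv)) then
    (st.1.insert e.1 e.2, st.2 ++ [e.1])
  else st

-- B's 'while dq' loop: popleft, relax, append improved nodes (same fuel guard as A's loop)
def pvDequeLoop (adj : PySem.Dict Int (List (Int × Int))) :
    Nat → PySem.Dict Int Int → List Int → PySem.Dict Int Int
  | 0, best, _ => best
  | _ + 1, best, [] => best
  | fuel + 1, best, u :: rest =>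
    let st := (adj.getD u []).foldl (pvRelaxB u) (best, rest)
    pvDequeLoop adj fuel st.1 st.2

def temporal_reachable_relax (source : Int) (adj : PySem.Dict Int (List (Int × Int))) : PySem.Set Int :=
  PySem.Set.ofList
    (pvDequeLoop adj (pvFuel adj) ((PySem.Dict.empty).insert source 0) [source]).keys

def failing_pairs_by_type_alt (k : Int) (edges : List (Int × Int × Int)) (orig_reach : List (Int × Int × Bool)) : List (String × Int) :=
  let adj := build_adj k edges
  let n := 2 * k
  let orig : PySem.Dict (Int × Int) Bool :=
    PySem.Dict.ofList (orig_reach.map (fun e => ((e.1, e.2.1), e.2.2)))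
  -- the comprehension: one flat list of bucket labels, one entry per failing pair
  let failed : List String := (PySem.List.pyRange 0 n 1).flatMap (fun s =>
    let r := temporal_reachable_relax s adj
    ((PySem.List.pyRange 0 n 1).filter (fun d =>
        (!(s == d)) && orig.getD (s, d) false && !(PySem.Set.contains r d))).map
      (fun d => (if s < k then "A" else "B") ++ (if d < k then "A" else "B")))
  -- the dict comprehension over the four keys
  [("AA", (PySem.List.count failed "AA" : Int)), ("AB", (PySem.List.count failed "AB" : Int)),
   ("BA", (PySem.List.count failed "BA" : Int)), ("BB", (PySem.List.count failed "BB" : Int))]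

-- ===== PRECONDITION & SPEC =====
def Spec_failing_pairs_by_type (k : Int) (edges : List (Int × Int × Int)) (orig_reach : List (Int × Int × Bool)) (out : List (String × Int)) : Prop := out = failing_pairs_by_type_alt k edges orig_reach
instance (k : Int) (edges : List (Int × Int × Int)) (orig_reach : List (Int × Int × Bool)) (out : List (String × Int)) : Decidable (Spec_failing_pairs_by_type k edges orig_reach out) := by unfold Spec_failing_pairs_by_type; infer_instance

-- ===== CLAIM (what is proved, stated in full; the proofs are below) =====
def Claim_equal_failing_pairs_by_type : Prop := ∀ (k : Int) (edges : List (Int × Int × Int)) (orig_reach : List (Int × Int × Bool)), Dom_failing_pairs_by_type k edges orig_reach → Spec_failing_pairs_by_type k edges orig_reach (failing_pairs_by_type k edges orig_reach)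

-- ===== LEMMAS AND PROOFS =====
-- ---- shared notions: temporal reachability, pointwise refinement, stability, potential ----

-- v is reachable from s with arrival time t along a time-nondecreasing path
inductive pvReach (adj : PySem.Dict Int (List (Int × Int))) (s : Int) : Int → Int → Prop
  | base : pvReach adj s s 0
  | step {u t v te} : pvReach adj s u t → (v, te) ∈ adj.getD u [] → t ≤ te → pvReach adj s v te

-- b' refines b: every key survives with a value that did not increase
def pvDLe (b b' : PySem.Dict Int Int) : Prop :=
  ∀ v c, b.get? v = some c → ∃ c', b'.get? v = some c' ∧ c' ≤ c

-- all relaxations out of u are already satisfied by b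
def pvStable (adj : PySem.Dict Int (List (Int × Int))) (b : PySem.Dict Int Int) (u : Int) : Prop :=
  ∀ v te, (v, te) ∈ adj.getD u [] → (∀ c, b.get? u = some c → c ≤ te) →
    ∃ c', b.get? v = some c' ∧ c' ≤ te

def pvSound (adj : PySem.Dict Int (List (Int × Int))) (s : Int) (b : PySem.Dict Int Int) : Prop :=
  ∀ v c, b.get? v = some c → pvReach adj s v c

def pvSlots (adj : PySem.Dict Int (List (Int × Int))) : List (Int × Int) :=
  adj.items.flatMap (fun p => p.2)

def pvSat (b : PySem.Dict Int Int) (e : Int × Int) : Bool :=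
  (b.get? e.1).any (fun c => decide (c ≤ e.2))

def pvPot (adj : PySem.Dict Int (List (Int × Int))) (b : PySem.Dict Int Int) : Nat :=
  (pvSlots adj).countP (fun e => !pvSat b e)

theorem pvDLe_refl (b : PySem.Dict Int Int) : pvDLe b b :=
  fun _v c h => ⟨c, h, le_refl c⟩

theorem pvDLe_trans {a b c : PySem.Dict Int Int} (h1 : pvDLe a b) (h2 : pvDLe b c) : pvDLe a c := by
  intro v x hx
  obtain ⟨y, hy, hyx⟩ := h1 v x hx
  obtain ⟨z, hz, hzy⟩ := h2 v y hy
  exact ⟨z, hz, le_trans hzy hyx⟩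

theorem pvDLe_insert (b : PySem.Dict Int Int) (v te : Int)
    (h : ∀ c, b.get? v = some c → te ≤ c) : pvDLe b (b.insert v te) := by
  intro w c hw
  by_cases hwv : w = v
  · subst hwv
    exact ⟨te, by simp [PySem.Dict.get?_insert_self], h c hw⟩
  · exact ⟨c, by rw [PySem.Dict.get?_insert_of_ne _ _ hwv]; exact hw, le_refl c⟩

theorem pvSat_mono {b b' : PySem.Dict Int Int} (h : pvDLe b b') (e : Int × Int)
    (hs : pvSat b e = true) : pvSat b' e = true := by
  unfold pvSat at *
  cases hb : b.get? e.1 with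
  | none => rw [hb] at hs; simp at hs
  | some c =>
    rw [hb] at hs; simp at hs
    obtain ⟨c', hc', hle⟩ := h e.1 c hb
    rw [hc']; simp; omega

theorem pvCountP_lt {α : Type} {l : List α} {p q : α → Bool}
    (hmono : ∀ x ∈ l, q x = true → p x = true) {x : α} (hx : x ∈ l)
    (hp : p x = true) (hq : q x = false) : l.countP q < l.countP p := by
  induction l with
  | nil => cases hx
  | cons a l ih =>
    rw [List.countP_cons, List.countP_cons]
    rcases List.mem_cons.mp hx with rfl | hx'
    · have h1 : l.countP q ≤ l.countP p :=
        List.countP_mono_left (fun y hy => hmono y (List.mem_cons_of_mem _ hy))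
      simp [hp, hq]; omega
    · have h2 : (if q a = true then 1 else 0) ≤ (if p a = true then 1 else 0) := by
        by_cases hqa : q a = true
        · simp [hqa, hmono a (List.mem_cons_self) hqa]
        · simp [hqa]
      have := ih (fun y hy => hmono y (List.mem_cons_of_mem _ hy)) hx'
      omega

theorem pvPot_strict {adj : PySem.Dict Int (List (Int × Int))} {b : PySem.Dict Int Int}
    {v te : Int} (hs : (v, te) ∈ pvSlots adj) (hun : pvSat b (v, te) = false) :
    pvPot adj (b.insert v te) < pvPot adj b := by
  unfold pvPot
  have hDLe : pvDLe b (b.insert v te) := by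
    apply pvDLe_insert
    intro c hc
    unfold pvSat at hun
    rw [hc] at hun; simp at hun; omega
  apply pvCountP_lt (x := (v, te)) _ hs
  · simpa using hun
  · have : pvSat (b.insert v te) (v, te) = true := by
      unfold pvSat
      simp [PySem.Dict.get?_insert_self]
    simpa using this
  · intro e _ he
    simp only [Bool.not_eq_eq_eq_not, Bool.not_true] at he ⊢
    cases hb : pvSat b e
    · rfl
    · exact absurd (pvSat_mono hDLe e hb) (by simp [he])

theorem pvMem_slots {adj : PySem.Dict Int (List (Int × Int))} {u : Int} {e : Int × Int}
    (he : e ∈ adj.getD u []) : e ∈ pvSlots adj := by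
  rw [PySem.Dict.getD_eq_get?_getD] at he
  cases hg : adj.get? u with
  | none => rw [hg] at he; simp at he
  | some l =>
    rw [hg] at he; simp at he
    have : (u, l) ∈ adj.items := PySem.Dict.mem_items_of_get?_eq_some _ hg
    unfold pvSlots
    exact List.mem_flatMap.mpr ⟨(u, l), this, he⟩

theorem pvStable_mono {adj : PySem.Dict Int (List (Int × Int))} {b b' : PySem.Dict Int Int}
    {w : Int} (hst : pvStable adj b w) (h : pvDLe b b') (heq : b'.get? w = b.get? w) :
    pvStable adj b' w := by
  intro v te hv hyp
  obtain ⟨c', hc', hle⟩ := hst v te hv (fun c hc => hyp c (by rw [heq]; exact hc))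
  obtain ⟨c'', hc'', hle'⟩ := h v c' hc'
  exact ⟨c'', hc'', le_trans hle' hle⟩


-- ---- pvHeapPop facts ----

theorem pvHeapPop_fst_mem : ∀ (l : List (Int × Int)), l ≠ [] → (pvHeapPop l).1 ∈ l := by
  intro l
  induction l with
  | nil => intro h; exact absurd rfl h
  | cons x tl ih =>
    intro _
    cases tl with
    | nil => simp [pvHeapPop]
    | cons y r =>
      show (pvHeapPop (x :: y :: r)).1 ∈ x :: y :: r
      unfold pvHeapPop
      dsimp only
      split
      · exact List.mem_cons_self
      · exact List.mem_cons_of_mem x (ih (by simp))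

theorem pvHeapPop_rest_subset :
    ∀ (l : List (Int × Int)) (x : Int × Int), x ∈ (pvHeapPop l).2 → x ∈ l := by
  intro l
  induction l with
  | nil => intro x hx; simp [pvHeapPop] at hx
  | cons a tl ih =>
    intro x hx
    cases tl with
    | nil => simp [pvHeapPop] at hx
    | cons y r =>
      unfold pvHeapPop at hx
      dsimp only at hx
      split at hx
      · exact List.mem_cons_of_mem a hx
      · rcases List.mem_cons.mp hx with rfl | hx'
        · exact List.mem_cons_self
        · exact List.mem_cons_of_mem a (ih x hx')

theorem pvHeapPop_rest_length :
    ∀ (l : List (Int × Int)), l ≠ [] → (pvHeapPop l).2.length + 1 = l.length := by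
  intro l
  induction l with
  | nil => intro h; exact absurd rfl h
  | cons a tl ih =>
    intro _
    cases tl with
    | nil => simp [pvHeapPop]
    | cons y r =>
      unfold pvHeapPop
      dsimp only
      split
      · simp
      · have := ih (by simp)
        simp only [List.length_cons] at *
        omega

theorem pvHeapPop_mem_rest :
    ∀ (l : List (Int × Int)) (x : Int × Int), x ∈ l → x ≠ (pvHeapPop l).1 → x ∈ (pvHeapPop l).2 := by
  intro l
  induction l with
  | nil => intro x hx; cases hx
  | cons a tl ih =>
    intro x hx hne
    cases tl with
    | nil =>
      simp [pvHeapPop] at hne ⊢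
      simp at hx
      exact absurd hx hne
    | cons y r =>
      unfold pvHeapPop at hne ⊢
      dsimp only at hne ⊢
      by_cases hc : pvHeapLe a (pvHeapPop (y :: r)).1 = true
      · simp only [hc, if_pos] at hne ⊢
        rcases List.mem_cons.mp hx with rfl | hx'
        · exact absurd rfl hne
        · exact hx'
      · simp only [hc, if_neg, Bool.false_eq_true, not_false_iff] at hne ⊢
        rcases List.mem_cons.mp hx with rfl | hx'
        · exact List.mem_cons_self
        · exact List.mem_cons_of_mem a (ih x hx' hne)

-- ---- the master inner-relaxation fold lemma, shared by A's heap loop and B's deque loop ----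
theorem pvFoldRelax {Q : Type} (adj : PySem.Dict Int (List (Int × Int))) (s u t : Int)
    (tag : Int × Int → Q)
    (f : PySem.Dict Int Int × List Q → (Int × Int) → PySem.Dict Int Int × List Q)
    (P : PySem.Dict Int Int → Prop)
    (EI : Q → PySem.Dict Int Int → Prop)
    (hEImono : ∀ x b b', pvDLe b b' → EI x b → EI x b')
    (hReach : pvReach adj s u t) :
    ∀ (l : List (Int × Int)) (b : PySem.Dict Int Int) (q : List Q),
    (∀ e ∈ l, e ∈ adj.getD u []) →
    (∀ (b₀ : PySem.Dict Int Int) (q₀ : List Q) (e : Int × Int), e ∈ l → P b₀ →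
       (f (b₀, q₀) e = (b₀, q₀) ∧ (t ≤ e.2 → ∃ c, b₀.get? e.1 = some c ∧ c ≤ e.2)) ∨
       (t ≤ e.2 ∧ (∀ c, b₀.get? e.1 = some c → e.2 < c) ∧
         f (b₀, q₀) e = (b₀.insert e.1 e.2, q₀ ++ [tag e]) ∧ P (b₀.insert e.1 e.2))) →
    (∀ (b₀ : PySem.Dict Int Int) (e : Int × Int), e ∈ l → t ≤ e.2 → EI (tag e) (b₀.insert e.1 e.2)) →
    P b → pvSound adj s b →
    P (l.foldl f (b, q)).1 ∧
    pvDLe b (l.foldl f (b, q)).1 ∧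
    (∀ x ∈ q, x ∈ (l.foldl f (b, q)).2) ∧
    2 * pvPot adj (l.foldl f (b, q)).1 + (l.foldl f (b, q)).2.length ≤ 2 * pvPot adj b + q.length ∧
    pvSound adj s (l.foldl f (b, q)).1 ∧
    (∀ e ∈ l, t ≤ e.2 → ∃ c, (l.foldl f (b, q)).1.get? e.1 = some c ∧ c ≤ e.2) ∧
    (∀ w, (l.foldl f (b, q)).1.get? w = b.get? w ∨
      ∃ te', tag (w, te') ∈ (l.foldl f (b, q)).2 ∧ (l.foldl f (b, q)).1.get? w = some te') ∧
    ((∀ x ∈ q, EI x b) → ∀ x ∈ (l.foldl f (b, q)).2, EI x (l.foldl f (b, q)).1) := by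
  intro l
  induction l with
  | nil =>
    intro b q _ _ _ hP hSound
    refine ⟨hP, pvDLe_refl b, fun x hx => hx, le_refl _, hSound, fun e he => absurd he (by simp),
      fun w => Or.inl rfl, fun h x hx => h x hx⟩
  | cons e l ih =>
    intro b q hl hstep hEInew hP hSound
    rcases hstep b q e (List.mem_cons_self) hP with ⟨heq, hid⟩ | ⟨hte, himp, heq, hP'⟩
    · -- step is the identity
      rw [List.foldl_cons, heq]
      obtain ⟨c1, c2, c3, c4, c5, c6, c7, c8⟩ :=
        ih b q (fun e' he' => hl e' (List.mem_cons_of_mem _ he'))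
          (fun b₀ q₀ e' he' => hstep b₀ q₀ e' (List.mem_cons_of_mem _ he'))
          (fun b₀ e' he' => hEInew b₀ e' (List.mem_cons_of_mem _ he')) hP hSound
      refine ⟨c1, c2, c3, c4, c5, ?_, c7, c8⟩
      intro e' he' hte'
      rcases List.mem_cons.mp he' with rfl | he''
      · obtain ⟨c, hc, hcle⟩ := hid hte'
        obtain ⟨c', hc', hcle'⟩ := c2 e'.1 c hc
        exact ⟨c', hc', le_trans hcle' hcle⟩
      · exact c6 e' he'' hte'
    · -- step updates e.1 to e.2 and pushes tag e
      rw [List.foldl_cons, heq]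
      have hDLe1 : pvDLe b (b.insert e.1 e.2) := by
        apply pvDLe_insert
        intro c hc
        exact le_of_lt (himp c hc)
      have hSound1 : pvSound adj s (b.insert e.1 e.2) := by
        intro w c hc
        rw [PySem.Dict.get?_insert] at hc
        split at hc
        · rename_i hw; cases hc
          subst hw
          exact pvReach.step hReach (hl e (List.mem_cons_self)) hte
        · exact hSound w c hc
      obtain ⟨c1, c2, c3, c4, c5, c6, c7, c8⟩ :=
        ih (b.insert e.1 e.2) (q ++ [tag e]) (fun e' he' => hl e' (List.mem_cons_of_mem _ he'))
          (fun b₀ q₀ e' he' => hstep b₀ q₀ e' (List.mem_cons_of_mem _ he'))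
          (fun b₀ e' he' => hEInew b₀ e' (List.mem_cons_of_mem _ he')) hP' hSound1
      have hpot : pvPot adj (b.insert e.1 e.2) < pvPot adj b := by
        apply pvPot_strict (pvMem_slots (hl e (List.mem_cons_self)))
        unfold pvSat
        cases hg : b.get? e.1 with
        | none => simp
        | some c => simp; have := himp c hg; omega
      refine ⟨c1, pvDLe_trans hDLe1 c2, ?_, ?_, c5, ?_, ?_, ?_⟩
      · intro x hx
        exact c3 x (List.mem_append_left _ hx)
      · have hq : (q ++ [tag e]).length = q.length + 1 := by simp
        rw [hq] at c4
        omega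
      · intro e' he' hte'
        rcases List.mem_cons.mp he' with rfl | he''
        · obtain ⟨c', hc', hcle'⟩ := c2 e'.1 e'.2 (PySem.Dict.get?_insert_self b e'.1 e'.2)
          exact ⟨c', hc', hcle'⟩
        · exact c6 e' he'' hte'
      · intro w
        rcases c7 w with hw | hw
        · by_cases hwe : w = e.1
          · right
            have hwe' : (w, e.2) = e := by rw [hwe]
            refine ⟨e.2, ?_, ?_⟩
            · rw [hwe']
              exact c3 (tag e) (List.mem_append_right _ (by simp))
            · rw [hw, hwe]
              exact PySem.Dict.get?_insert_self b e.1 e.2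
          · left
            rw [hw, PySem.Dict.get?_insert_of_ne _ _ hwe]
        · exact Or.inr hw
      · intro hq x hx
        apply c8 _ x hx
        intro x' hx'
        rcases List.mem_append.mp hx' with hx'' | hx''
        · exact hEImono x' b _ hDLe1 (hq x' hx'')
        · have : x' = tag e := by simpa using hx''
          subst this
          exact hEInew b e (List.mem_cons_self) hte

-- step characterization of A's relaxation
theorem pvRelaxA_step (t : Int) (b₀ : PySem.Dict Int Int) (q₀ : List (Int × Int)) (e : Int × Int) :
    (pvRelaxA t (b₀, q₀) e = (b₀, q₀) ∧ (t ≤ e.2 → ∃ c, b₀.get? e.1 = some c ∧ c ≤ e.2)) ∨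
    (t ≤ e.2 ∧ (∀ c, b₀.get? e.1 = some c → e.2 < c) ∧
      pvRelaxA t (b₀, q₀) e = (b₀.insert e.1 e.2, q₀ ++ [(e.2, e.1)]) ∧ True) := by
  by_cases hg : t ≤ e.2
  · cases hall : (b₀.get? e.1).all (fun bv => decide (e.2 < bv)) with
    | true =>
      refine Or.inr ⟨hg, ?_, ?_, trivial⟩
      · intro c hc
        rw [hc] at hall
        simpa using hall
      · unfold pvRelaxA
        rw [hall]
        simp [hg]
    | false =>
      refine Or.inl ⟨?_, ?_⟩
      · unfold pvRelaxA
        rw [hall]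
        simp [hg]
      · intro _
        cases hgc : b₀.get? e.1 with
        | none => rw [hgc] at hall; simp at hall
        | some c =>
          rw [hgc] at hall
          simp at hall
          exact ⟨c, rfl, hall⟩
  · refine Or.inl ⟨?_, fun h => absurd h hg⟩
    unfold pvRelaxA
    simp [hg]

theorem pvHeapLoop_main (adj : PySem.Dict Int (List (Int × Int))) (s : Int) :
    ∀ (fuel : Nat) (b : PySem.Dict Int Int) (q : List (Int × Int)),
    2 * pvPot adj b + q.length < fuel →
    pvSound adj s b →
    (∀ x ∈ q, pvReach adj s x.2 x.1 ∧ ∃ c, b.get? x.2 = some c ∧ c ≤ x.1) →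
    (∀ w c, b.get? w = some c → (∃ p ∈ q, p.2 = w ∧ b.get? w = some p.1) ∨ pvStable adj b w) →
    pvDLe b (pvHeapLoop adj fuel b q) ∧ pvSound adj s (pvHeapLoop adj fuel b q) ∧
      (∀ w c, (pvHeapLoop adj fuel b q).get? w = some c → pvStable adj (pvHeapLoop adj fuel b q) w) := by
  intro fuel
  induction fuel with
  | zero => intro b q hfuel _ _ _; omega
  | succ fuel ih =>
    intro b q hfuel hSound hQ hInv
    cases q with
    | nil =>
      simp only [pvHeapLoop]
      refine ⟨pvDLe_refl b, hSound, ?_⟩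
      intro w c hc
      rcases hInv w c hc with ⟨p', hp', _⟩ | hst
      · cases hp'
      · exact hst
    | cons a qs =>
      have hne : (a :: qs : List (Int × Int)) ≠ [] := by simp
      have hmem := pvHeapPop_fst_mem (a :: qs) hne
      have hlen := pvHeapPop_rest_length (a :: qs) hne
      obtain ⟨hreach, bu, hbu, hbule⟩ := hQ _ hmem
      simp only [pvHeapLoop]
      by_cases hany : ((b.get? (pvHeapPop (a :: qs)).1.2).any
          (fun b' => decide (b' < (pvHeapPop (a :: qs)).1.1))) = true
      · -- stale entry: skip
        simp only [hany, if_true]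
        rw [hbu] at hany
        simp at hany
        apply ih
        · simp only [List.length_cons] at hfuel hlen
          omega
        · exact hSound
        · exact fun x hx => hQ x (pvHeapPop_rest_subset _ x hx)
        · intro w c hc
          rcases hInv w c hc with ⟨p', hp', hp'w, hval⟩ | hst
          · left
            refine ⟨p', pvHeapPop_mem_rest _ p' hp' ?_, hp'w, hval⟩
            intro hpp
            rw [hpp] at hp'w hval
            rw [← hp'w, hbu] at hval
            injection hval with hval'
            omega
          · exact Or.inr hst
      · -- process the popped entry
        simp only [hany]
        rw [hbu] at hany
        simp at hany
        have hbut : bu = (pvHeapPop (a :: qs)).1.1 := le_antisymm hbule hany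
        obtain ⟨_, c2, c3, c4, c5, c6, c7, c8⟩ :=
          pvFoldRelax adj s (pvHeapPop (a :: qs)).1.2 (pvHeapPop (a :: qs)).1.1
            (fun e => (e.2, e.1)) (pvRelaxA (pvHeapPop (a :: qs)).1.1) (fun _ => True)
            (fun x b' => pvReach adj s x.2 x.1 ∧ ∃ c, b'.get? x.2 = some c ∧ c ≤ x.1)
            (by
              intro x b' b'' hd hEI
              obtain ⟨hr, c, hc, hcle⟩ := hEI
              obtain ⟨c', hc', hcle'⟩ := hd x.2 c hc
              exact ⟨hr, c', hc', le_trans hcle' hcle⟩)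
            hreach
            (adj.getD (pvHeapPop (a :: qs)).1.2 []) b (pvHeapPop (a :: qs)).2
            (fun e he => he)
            (fun b₀ q₀ e _ _ => pvRelaxA_step _ b₀ q₀ e)
            (by
              intro b₀ e he hte
              exact ⟨pvReach.step hreach he hte,
                e.2, PySem.Dict.get?_insert_self b₀ e.1 e.2, le_refl e.2⟩)
            trivial hSound
        obtain ⟨hd2, hs2, hst2⟩ := ih _ _
          (by
            simp only [List.length_cons] at hfuel hlen
            omega)
          c5
          (c8 (fun x hx => hQ x (pvHeapPop_rest_subset _ x hx)))
          (by
            intro w c hc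
            rcases c7 w with heqw | ⟨te', hmemq, hval⟩
            · rw [heqw] at hc
              rcases hInv w c hc with ⟨p', hp', hp'w, hval⟩ | hst
              · by_cases hpp : p' = (pvHeapPop (a :: qs)).1
                · right
                  rw [hpp] at hp'w hval
                  intro v te hv hyp
                  have hb1w := heqw.trans hval
                  exact c6 (v, te) (by rw [hp'w]; exact hv) (hyp _ hb1w)
                · left
                  exact ⟨p', c3 p' (pvHeapPop_mem_rest _ p' hp' hpp), hp'w,
                    heqw.trans hval⟩
              · exact Or.inr (pvStable_mono hst c2 heqw)
            · left
              exact ⟨(te', w), hmemq, rfl, hval⟩)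
        exact ⟨pvDLe_trans c2 hd2, hs2, hst2⟩

-- step characterization of B's relaxation (given that u's entry is pinned to bu)
theorem pvRelaxB_step (u bu : Int) (b₀ : PySem.Dict Int Int) (q₀ : List Int) (e : Int × Int)
    (hP : b₀.get? u = some bu) :
    (pvRelaxB u (b₀, q₀) e = (b₀, q₀) ∧ (bu ≤ e.2 → ∃ c, b₀.get? e.1 = some c ∧ c ≤ e.2)) ∨
    (bu ≤ e.2 ∧ (∀ c, b₀.get? e.1 = some c → e.2 < c) ∧
      pvRelaxB u (b₀, q₀) e = (b₀.insert e.1 e.2, q₀ ++ [e.1]) ∧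
      (b₀.insert e.1 e.2).get? u = some bu) := by
  have hgd : b₀.getD u 0 = bu := by
    rw [PySem.Dict.getD_eq_get?_getD, hP]
    rfl
  by_cases hg : bu ≤ e.2
  · cases hall : (b₀.get? e.1).all (fun bv => decide (e.2 < bv)) with
    | true =>
      have hne : u ≠ e.1 := by
        intro hue
        rw [← hue, hP] at hall
        simp at hall
        omega
      refine Or.inr ⟨hg, ?_, ?_, ?_⟩
      · intro c hc
        rw [hc] at hall
        simpa using hall
      · unfold pvRelaxB
        rw [hgd, hall]
        simp [hg]
      · rw [PySem.Dict.get?_insert_of_ne _ _ hne]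
        exact hP
    | false =>
      refine Or.inl ⟨?_, ?_⟩
      · unfold pvRelaxB
        rw [hgd, hall]
        simp
      · intro _
        cases hgc : b₀.get? e.1 with
        | none => rw [hgc] at hall; simp at hall
        | some c =>
          rw [hgc] at hall
          simp at hall
          exact ⟨c, rfl, hall⟩
  · refine Or.inl ⟨?_, fun h => absurd h hg⟩
    unfold pvRelaxB
    rw [hgd]
    simp [hg]

theorem pvDequeLoop_main (adj : PySem.Dict Int (List (Int × Int))) (s : Int) :
    ∀ (fuel : Nat) (b : PySem.Dict Int Int) (dq : List Int),
    2 * pvPot adj b + dq.length < fuel →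
    pvSound adj s b →
    (∀ v ∈ dq, ∃ c, b.get? v = some c) →
    (∀ w c, b.get? w = some c → w ∈ dq ∨ pvStable adj b w) →
    pvDLe b (pvDequeLoop adj fuel b dq) ∧ pvSound adj s (pvDequeLoop adj fuel b dq) ∧
      (∀ w c, (pvDequeLoop adj fuel b dq).get? w = some c →
        pvStable adj (pvDequeLoop adj fuel b dq) w) := by
  intro fuel
  induction fuel with
  | zero => intro b dq hfuel _ _ _; omega
  | succ fuel ih =>
    intro b dq hfuel hSound hQ hInv
    cases dq with
    | nil =>
      simp only [pvDequeLoop]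
      refine ⟨pvDLe_refl b, hSound, ?_⟩
      intro w c hc
      rcases hInv w c hc with h | hst
      · cases h
      · exact hst
    | cons u rest =>
      obtain ⟨bu, hbu⟩ := hQ u List.mem_cons_self
      have hreach : pvReach adj s u bu := hSound u bu hbu
      simp only [pvDequeLoop]
      obtain ⟨c1, c2, c3, c4, c5, c6, c7, c8⟩ :=
        pvFoldRelax adj s u bu (fun e => e.1) (pvRelaxB u)
          (fun b₀ => b₀.get? u = some bu)
          (fun v b' => ∃ c, b'.get? v = some c)
          (by
            intro x b' b'' hd ⟨c, hc⟩
            obtain ⟨c', hc', _⟩ := hd x c hc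
            exact ⟨c', hc'⟩)
          hreach
          (adj.getD u []) b rest
          (fun e he => he)
          (fun b₀ q₀ e _ hP => pvRelaxB_step u bu b₀ q₀ e hP)
          (fun b₀ e _ _ => ⟨e.2, PySem.Dict.get?_insert_self b₀ e.1 e.2⟩)
          hbu hSound
      obtain ⟨hd2, hs2, hst2⟩ := ih _ _
        (by
          simp only [List.length_cons] at hfuel
          omega)
        c5
        (c8 (fun x hx => hQ x (List.mem_cons_of_mem _ hx)))
        (by
          intro w c hc
          rcases c7 w with heqw | ⟨te', hmemq, hval⟩
          · rw [heqw] at hc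
            rcases hInv w c hc with hmem | hst
            · rcases List.mem_cons.mp hmem with rfl | hmem'
              · right
                intro v te hv hyp
                have hble : bu ≤ te := hyp bu c1
                exact c6 (v, te) hv hble
              · exact Or.inl (c3 w hmem')
            · exact Or.inr (pvStable_mono hst c2 heqw)
          · exact Or.inl hmemq)
      exact ⟨pvDLe_trans c2 hd2, hs2, hst2⟩

-- completeness: a stable refinement anchored at the source covers every reachable node
theorem pvComplete (adj : PySem.Dict Int (List (Int × Int))) (s : Int) (R : PySem.Dict Int Int)
    (hstable : ∀ w c, R.get? w = some c → pvStable adj R w)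
    (hanchor : ∃ c, R.get? s = some c ∧ c ≤ 0) :
    ∀ v t, pvReach adj s v t → ∃ c, R.get? v = some c ∧ c ≤ t := by
  intro v t h
  induction h with
  | base => exact hanchor
  | step h1 h2 h3 ih =>
    obtain ⟨c, hc, hcle⟩ := ih
    refine hstable _ c hc _ _ h2 ?_
    intro c' hc'
    rw [hc] at hc'
    injection hc' with h'
    omega

-- initial-state facts
theorem pvInit_get? (s w : Int) {c : Int}
    (h : ((PySem.Dict.empty : PySem.Dict Int Int).insert s 0).get? w = some c) :
    w = s ∧ c = 0 := by
  rw [PySem.Dict.get?_insert] at h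
  split at h
  · rename_i hw
    cases h
    exact ⟨hw, rfl⟩
  · rw [PySem.Dict.get?_empty] at h
    cases h

theorem pvFuel_ok (adj : PySem.Dict Int (List (Int × Int))) (b : PySem.Dict Int Int) :
    2 * pvPot adj b + 1 < pvFuel adj := by
  unfold pvFuel
  have h1 : pvPot adj b ≤ (pvSlots adj).length := List.countP_le_length
  have h2 : (pvSlots adj).length = (adj.items.map (fun p => p.2.length)).sum := by
    unfold pvSlots
    exact List.length_flatMap
  omega

theorem pvLoopA_iff (adj : PySem.Dict Int (List (Int × Int))) (s v : Int) :
    (∃ c, (pvHeapLoop adj (pvFuel adj) ((PySem.Dict.empty).insert s 0) [(0, s)]).get? v = some c)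
      ↔ ∃ t, pvReach adj s v t := by
  have hs0 : ((PySem.Dict.empty : PySem.Dict Int Int).insert s 0).get? s = some 0 :=
    PySem.Dict.get?_insert_self _ s 0
  obtain ⟨hDLe, hSound, hStable⟩ := pvHeapLoop_main adj s (pvFuel adj)
    ((PySem.Dict.empty).insert s 0) [(0, s)]
    (by simpa using pvFuel_ok adj _)
    (by
      intro w c hc
      obtain ⟨rfl, rfl⟩ := pvInit_get? s w hc
      exact pvReach.base)
    (by
      intro x hx
      simp at hx
      subst hx
      exact ⟨pvReach.base, 0, hs0, le_refl 0⟩)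
    (by
      intro w c hc
      obtain ⟨rfl, rfl⟩ := pvInit_get? s w hc
      exact Or.inl ⟨(0, w), by simp, rfl, hs0⟩)
  constructor
  · intro ⟨c, hc⟩
    exact ⟨c, hSound v c hc⟩
  · intro ⟨t, ht⟩
    obtain ⟨c, hc, _⟩ := pvComplete adj s _ hStable
      (by
        obtain ⟨c₀, hc₀, hle₀⟩ := hDLe s 0 hs0
        exact ⟨c₀, hc₀, hle₀⟩) v t ht
    exact ⟨c, hc⟩

theorem pvLoopB_iff (adj : PySem.Dict Int (List (Int × Int))) (s v : Int) :
    (∃ c, (pvDequeLoop adj (pvFuel adj) ((PySem.Dict.empty).insert s 0) [s]).get? v = some c)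
      ↔ ∃ t, pvReach adj s v t := by
  have hs0 : ((PySem.Dict.empty : PySem.Dict Int Int).insert s 0).get? s = some 0 :=
    PySem.Dict.get?_insert_self _ s 0
  obtain ⟨hDLe, hSound, hStable⟩ := pvDequeLoop_main adj s (pvFuel adj)
    ((PySem.Dict.empty).insert s 0) [s]
    (by simpa using pvFuel_ok adj _)
    (by
      intro w c hc
      obtain ⟨rfl, rfl⟩ := pvInit_get? s w hc
      exact pvReach.base)
    (by
      intro x hx
      simp at hx
      subst hx
      exact ⟨0, hs0⟩)
    (by
      intro w c hc
      obtain ⟨rfl, _⟩ := pvInit_get? s w hc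
      exact Or.inl (by simp))
  constructor
  · intro ⟨c, hc⟩
    exact ⟨c, hSound v c hc⟩
  · intro ⟨t, ht⟩
    obtain ⟨c, hc, _⟩ := pvComplete adj s _ hStable
      (by
        obtain ⟨c₀, hc₀, hle₀⟩ := hDLe s 0 hs0
        exact ⟨c₀, hc₀, hle₀⟩) v t ht
    exact ⟨c, hc⟩

theorem pvMem_keys_iff (R : PySem.Dict Int Int) (d : Int) :
    d ∈ R.keys ↔ ∃ c, R.get? d = some c := by
  cases hg : R.get? d with
  | none =>
    simp only [PySem.Dict.get?_eq_none_iff_not_mem_keys] at hg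
    simp [hg]
  | some c =>
    have := PySem.Dict.mem_keys_of_mem_items R (PySem.Dict.mem_items_of_get?_eq_some R hg)
    simp only [this, true_iff]
    exact ⟨c, rfl⟩

-- the two reachable sets agree on membership (their element order may differ)
theorem pvContains_eq (adj : PySem.Dict Int (List (Int × Int))) (s d : Int) :
    PySem.Set.contains (temporal_reachable_from s adj) d =
    PySem.Set.contains (temporal_reachable_relax s adj) d := by
  rw [Bool.eq_iff_iff]
  unfold temporal_reachable_from temporal_reachable_relax
  rw [PySem.Set.contains_iff, PySem.Set.contains_iff, PySem.Set.mem_ofList, PySem.Set.mem_ofList,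
    pvMem_keys_iff, pvMem_keys_iff, pvLoopA_iff, pvLoopB_iff]

-- ---- counting: A's counter-dict fold versus B's label list + count ----

-- the inner 'if cond: fails[lab] += 1' loop is the counter fold over the labels it selects
theorem pvInnerFold (p : Int → Bool) (lab : Int → String) :
    ∀ (ds : List Int) (D : PySem.Dict String Int),
    ds.foldl (fun f d => if p d then f.modify (lab d) 0 (fun c => c + 1) else f) D
      = ((ds.filter p).map lab).foldl (fun f lb => f.modify lb 0 (fun c => c + 1)) D := by
  intro ds
  induction ds with
  | nil => intro D; rfl
  | cons a t ih =>
    intro D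
    by_cases h : p a = true <;> simp [h, ih]

-- folding the counter over a flatMap is the nested fold
theorem pvFoldFlat (g : Int → List String) :
    ∀ (l : List Int) (D : PySem.Dict String Int),
    (l.flatMap g).foldl (fun f lb => f.modify lb 0 (fun c => c + 1)) D
      = l.foldl (fun f s => (g s).foldl (fun f lb => f.modify lb 0 (fun c => c + 1)) f) D := by
  intro l
  induction l with
  | nil => intro D; rfl
  | cons a t ih =>
    intro D
    simp [List.flatMap_cons, List.foldl_append, ih]

-- every bucket label is one of the four keys
theorem pvLabelMem (k s d : Int) :
    ((if s < k then "A" else "B") ++ (if d < k then "A" else "B"))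
      ∈ (["AA", "AB", "BA", "BB"] : List String) := by
  split_ifs <;> decide

-- items of the counter fold from the four-key dict are the four counts, in key order
theorem pvItemsCount (L : List String)
    (h : ∀ lab ∈ L, lab ∈ (["AA", "AB", "BA", "BB"] : List String)) :
    (L.foldl (fun f lb => f.modify lb 0 (fun c => c + 1))
        (((((PySem.Dict.empty).insert "AA" 0).insert "AB" 0).insert "BA" 0).insert "BB" (0 : Int))).items
      = [("AA", (List.count "AA" L : Int)), ("AB", (List.count "AB" L : Int)),
         ("BA", (List.count "BA" L : Int)), ("BB", (List.count "BB" L : Int))] := by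
  have hkeys : (L.foldl (fun f lb => f.modify lb 0 (fun c => c + 1))
      (((((PySem.Dict.empty).insert "AA" 0).insert "AB" 0).insert "BA" 0).insert "BB" (0 : Int))).keys
      = ["AA", "AB", "BA", "BB"] := by
    rw [PySem.Dict.keys_foldl_modify L 0 (fun _ _ c => c + 1) _,
      PySem.Set.update_eq_append_filter]
    have hnil : List.filter
        (fun y => !(PySem.Set.contains
          ((((((PySem.Dict.empty).insert "AA" 0).insert "AB" 0).insert "BA" 0).insert "BB" (0 : Int))).keys y))
        (PySem.Set.ofList L) = [] := by
      rw [List.filter_eq_nil_iff]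
      intro a ha
      have haL : a ∈ L := (PySem.Set.mem_ofList L a).mp ha
      have h4 := h a haL
      simp only [List.mem_cons, List.not_mem_nil, or_false] at h4
      rcases h4 with rfl | rfl | rfl | rfl <;> decide
    rw [hnil]
    decide
  have hnd : (L.foldl (fun f lb => f.modify lb 0 (fun c => c + 1))
      (((((PySem.Dict.empty).insert "AA" 0).insert "AB" 0).insert "BA" 0).insert "BB" (0 : Int))).keys.Nodup := by
    rw [hkeys]; decide
  rw [PySem.Dict.items_eq_map_keys _ hnd (0 : Int), hkeys]
  simp only [List.map_cons, List.map_nil, PySem.Dict.getD_foldl_modify_add_one]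
  have e1 : ((((((PySem.Dict.empty).insert "AA" 0).insert "AB" 0).insert "BA" 0).insert "BB" (0 : Int))).getD "AA" 0 = 0 := by decide
  have e2 : ((((((PySem.Dict.empty).insert "AA" 0).insert "AB" 0).insert "BA" 0).insert "BB" (0 : Int))).getD "AB" 0 = 0 := by decide
  have e3 : ((((((PySem.Dict.empty).insert "AA" 0).insert "AB" 0).insert "BA" 0).insert "BB" (0 : Int))).getD "BA" 0 = 0 := by decide
  have e4 : ((((((PySem.Dict.empty).insert "AA" 0).insert "AB" 0).insert "BA" 0).insert "BB" (0 : Int))).getD "BB" 0 = 0 := by decide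
  rw [e1, e2, e3, e4]
  simp

-- A's nested counting fold, written over the flat label list
theorem pvOuter (k : Int) (adj : PySem.Dict Int (List (Int × Int))) (orig : PySem.Dict (Int × Int) Bool)
    (D : PySem.Dict String Int) :
    (PySem.List.pyRange 0 (2 * k) 1).foldl (fun fails s =>
        (PySem.List.pyRange 0 (2 * k) 1).foldl (fun fails d =>
          if (!(s == d)) && orig.getD (s, d) false && !(PySem.Set.contains (temporal_reachable_relax s adj) d) then
            fails.modify ((if s < k then "A" else "B") ++ (if d < k then "A" else "B")) 0 (fun c => c + 1)
          else fails) fails) D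
      = ((PySem.List.pyRange 0 (2 * k) 1).flatMap (fun s =>
          ((PySem.List.pyRange 0 (2 * k) 1).filter (fun d =>
              (!(s == d)) && orig.getD (s, d) false && !(PySem.Set.contains (temporal_reachable_relax s adj) d))).map
            (fun d => (if s < k then "A" else "B") ++ (if d < k then "A" else "B")))).foldl
          (fun f lb => f.modify lb 0 (fun c => c + 1)) D := by
  rw [pvFoldFlat]
  have hfun : (fun (fails : PySem.Dict String Int) (s : Int) =>
      (PySem.List.pyRange 0 (2 * k) 1).foldl (fun fails d =>
        if (!(s == d)) && orig.getD (s, d) false && !(PySem.Set.contains (temporal_reachable_relax s adj) d) then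
          fails.modify ((if s < k then "A" else "B") ++ (if d < k then "A" else "B")) 0 (fun c => c + 1)
        else fails) fails)
    = (fun (fails : PySem.Dict String Int) (s : Int) =>
        (((PySem.List.pyRange 0 (2 * k) 1).filter (fun d =>
            (!(s == d)) && orig.getD (s, d) false && !(PySem.Set.contains (temporal_reachable_relax s adj) d))).map
          (fun d => (if s < k then "A" else "B") ++ (if d < k then "A" else "B"))).foldl
          (fun f lb => f.modify lb 0 (fun c => c + 1)) fails) := by
    funext fails s
    exact pvInnerFold _ _ _ _
  rw [hfun]

-- ===== VERDICT (by name: the statement is the Claim_ definition above) =====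
theorem failing_pairs_by_type_spec : Claim_equal_failing_pairs_by_type := by
  unfold Claim_equal_failing_pairs_by_type
  intro k edges orig_reach _
  unfold Spec_failing_pairs_by_type
  unfold failing_pairs_by_type failing_pairs_by_type_alt
  simp only [pvContains_eq]
  rw [pvOuter]
  rw [pvItemsCount]
  · simp only [PySem.List.count_eq]
  · intro lab hl
    rcases List.mem_flatMap.mp hl with ⟨s, _, hl2⟩
    rcases List.mem_map.mp hl2 with ⟨d, _, rfl⟩
    exact pvLabelMem k s d
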